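-- pv_equiv track=rewrite | github.com/coltonb/advent-of-code | 2023/13/main.py | reflection_points
-- ===== SOURCE A (Python) =====
-- def reflection_points(line: str):
--     points = set()
--
--     for i in range(len(line) - 1):
--         low = i
--         high = i + 1
--         mirrored = True
--
--         while low >= 0 and high < len(line):
--             if line[low] != line[high]:
--                 mirrored = False
--                 break
--
--             low -= 1
--             high += 1
--
--         if mirrored:
--             points.add((i + 1, i + 2))
--
--     return points
-- ===== SOURCE B (Python) =====
-- def reflection_points(line: str):
--     # Compare whole slices against a precomputed reversed string instead of
--     # walking characters with an inner while loop.
--     n = len(line)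
--     rev = line[::-1]
--     return {
--         (i + 1, i + 2)
--         for i in range(n - 1)
--         if line[i + 1 : i + 1 + min(i + 1, n - 1 - i)]
--         == rev[n - 1 - i : n - 1 - i + min(i + 1, n - 1 - i)]
--     }
-- ===== Notes on version B (the rewrite author's own statement) =====
-- stated objective: alternative
-- what changed: Replaces the per-gap inner while loop (char-by-char outward walk with a break flag) by a single precomputed reversed string and one slice-equality comparison per gap in a set comprehension.
import Mathlib
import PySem

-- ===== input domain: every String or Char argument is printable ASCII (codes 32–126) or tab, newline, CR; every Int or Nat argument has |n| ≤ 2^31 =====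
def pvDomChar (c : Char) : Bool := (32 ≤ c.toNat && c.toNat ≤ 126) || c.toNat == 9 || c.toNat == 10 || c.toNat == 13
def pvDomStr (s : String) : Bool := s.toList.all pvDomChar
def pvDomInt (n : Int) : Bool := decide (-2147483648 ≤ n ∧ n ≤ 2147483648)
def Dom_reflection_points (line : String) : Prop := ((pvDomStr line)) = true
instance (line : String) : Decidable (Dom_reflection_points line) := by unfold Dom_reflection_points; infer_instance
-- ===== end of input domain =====

-- B replaces A's per-gap inner while loop by one slice comparison per gap
-- against a precomputed reversed string (alternative decomposition, same cost).


-- ===== PORT A =====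
-- A's inner 'while low >= 0 and high < len(line)' loop with its break flag.
def pvMirrored (cs : List Char) (low high : Int) : Bool :=
  if h : 0 ≤ low ∧ high < (cs.length : Int) then
    if PySem.List.pyGet? cs low ≠ PySem.List.pyGet? cs high then false
    else pvMirrored cs (low - 1) (high + 1)
  else true
termination_by (low + 1).toNat
decreasing_by omega

def reflection_points (line : String) : List (Int × Int) :=
  (PySem.List.pyRange 0 ((line.toList.length : Int) - 1) 1).foldl
    (fun pts i => if pvMirrored line.toList i (i + 1) then PySem.Set.add pts (i + 1, i + 2) else pts)
    PySem.Set.empty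

-- ===== PORT B =====
def reflection_points_alt (line : String) : List (Int × Int) :=
  -- cs = list of line's chars; line[::-1] is ported as List.reverse
  PySem.Set.ofList ((PySem.List.pyRange 0 ((line.toList.length : Int) - 1) 1).filterMap (fun i =>
    if PySem.List.slice line.toList (some (i + 1))
          (some (i + 1 + min (i + 1) ((line.toList.length : Int) - 1 - i)))
        = PySem.List.slice line.toList.reverse (some ((line.toList.length : Int) - 1 - i))
          (some ((line.toList.length : Int) - 1 - i + min (i + 1) ((line.toList.length : Int) - 1 - i)))
    then some (i + 1, i + 2) else none))

-- ===== PRECONDITION & SPEC =====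
def Spec_reflection_points (line : String) (out : List (Int × Int)) : Prop := out = reflection_points_alt line
instance (line : String) (out : List (Int × Int)) : Decidable (Spec_reflection_points line out) := by unfold Spec_reflection_points; infer_instance

-- ===== CLAIM (what is proved, stated in full; the proofs are below) =====
def Claim_equal_reflection_points : Prop := ∀ (line : String), Dom_reflection_points line → Spec_reflection_points line (reflection_points line)

-- ===== LEMMAS AND PROOFS =====

-- A's while loop returns true iff the two outward takes up to the nearer boundary agree.
theorem pvMirrored_iff (cs : List Char) (l h : Nat) (hlh : l < h) :
    pvMirrored cs (l : Int) (h : Int) = true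
      ↔ ((cs.drop h).take (min (l + 1) (cs.length - h))
          = ((cs.take (l + 1)).reverse).take (min (l + 1) (cs.length - h))) := by
  induction l generalizing h with
  | zero =>
    rw [pvMirrored]
    simp only [Nat.cast_zero]
    by_cases hh : h < cs.length
    · have hg : (0:Int) ≤ 0 ∧ (h:Int) < (cs.length:Int) := by constructor <;> omega
      rw [dif_pos hg]
      have hm : min (0+1) (cs.length - h) = 1 := by omega
      rw [hm]
      have h0 : 0 < cs.length := by omega
      have hd : (cs.drop h).take 1 = [cs[h]] := by
        rw [List.drop_eq_getElem_cons hh]; rfl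
      have ht : ((cs.take 1).reverse).take 1 = [cs[0]] := by
        rw [List.take_one]
        cases cs with
        | nil => simp at h0
        | cons a t => simp
      rw [hd, ht]
      have hga : PySem.List.pyGet? cs ((0:Nat):Int) = some cs[0] :=
        PySem.List.pyGet?_ofNat cs 0 h0
      have hgb : PySem.List.pyGet? cs ((h:Nat):Int) = some cs[h] :=
        PySem.List.pyGet?_ofNat cs h hh
      simp only [Nat.cast_zero] at hga
      rw [hga, hgb]
      by_cases he : cs[0] = cs[h]
      · simp [he]
        rw [pvMirrored]
        rw [dif_neg (by omega)]
      · simp [he, Ne.symm he]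
    · rw [dif_neg (by omega)]
      have : cs.length - h = 0 := by omega
      simp [this]
  | succ k ih =>
    rw [pvMirrored]
    by_cases hh : h < cs.length
    · have hg : (0:Int) ≤ ((k+1:Nat):Int) ∧ (h:Int) < (cs.length:Int) := by constructor <;> omega
      rw [dif_pos hg]
      have hl : k + 1 < cs.length := by omega
      have hga : PySem.List.pyGet? cs (((k+1:Nat)):Int) = some cs[k+1] :=
        PySem.List.pyGet?_ofNat cs (k+1) hl
      have hgb : PySem.List.pyGet? cs ((h:Nat):Int) = some cs[h] :=
        PySem.List.pyGet?_ofNat cs h hh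
      rw [hga, hgb]
      have hcast : ((k+1:Nat):Int) - 1 = ((k:Nat):Int) := by push_cast; ring
      have hcast2 : ((h:Nat):Int) + 1 = ((h+1:Nat):Int) := by push_cast; ring
      rw [hcast, hcast2]
      have hrec := ih (h+1) (by omega)
      have hd : (cs.drop h).take (min (k+1+1) (cs.length - h))
          = cs[h] :: (cs.drop (h+1)).take (min (k+1) (cs.length - (h+1))) := by
        rw [List.drop_eq_getElem_cons hh]
        have : min (k+1+1) (cs.length - h) = (min (k+1) (cs.length - (h+1))) + 1 := by omega
        rw [this, List.take_succ_cons]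
      have ht : ((cs.take (k+1+1)).reverse).take (min (k+1+1) (cs.length - h))
          = cs[k+1] :: ((cs.take (k+1)).reverse).take (min (k+1) (cs.length - (h+1))) := by
        rw [List.take_add_one, List.getElem?_eq_getElem hl]
        simp only [Option.toList_some, List.reverse_append, List.reverse_cons, List.reverse_nil,
          List.nil_append, List.cons_append]
        have : min (k+1+1) (cs.length - h) = (min (k+1) (cs.length - (h+1))) + 1 := by omega
        rw [this, List.take_succ_cons]
      rw [hd, ht]
      by_cases he : cs[k+1] = cs[h]
      · simp only [he, ne_eq, not_true_eq_false, ite_false]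
        rw [hrec]
        constructor
        · intro h2; rw [h2]
        · intro h2; exact (List.cons.injEq _ _ _ _).mp h2 |>.2
      · simp [he, Ne.symm he]
    · rw [dif_neg (by omega)]
      have : cs.length - h = 0 := by omega
      simp [this]

-- B's per-gap slice condition states the same list equality.
theorem slice_cond_eq (cs : List Char) (j : Nat) (hj : j + 1 < cs.length) :
    (PySem.List.slice cs (some ((j : Int) + 1))
        (some ((j : Int) + 1 + min ((j : Int) + 1) ((cs.length : Int) - 1 - j)))
      = PySem.List.slice cs.reverse (some ((cs.length : Int) - 1 - j))
        (some ((cs.length : Int) - 1 - j + min ((j : Int) + 1) ((cs.length : Int) - 1 - j)))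
      ↔ ((cs.drop (j + 1)).take (min (j + 1) (cs.length - (j + 1)))
        = ((cs.take (j + 1)).reverse).take (min (j + 1) (cs.length - (j + 1))))) := by
  have h1 : (j : Int) + 1 = ((j + 1 : Nat) : Int) := by push_cast; ring
  have hm : min ((j : Int) + 1) ((cs.length : Int) - 1 - j)
      = ((min (j + 1) (cs.length - (j + 1)) : Nat) : Int) := by omega
  have h2 : (cs.length : Int) - 1 - j = ((cs.length - (j + 1) : Nat) : Int) := by omega
  rw [hm, h1, h2, PySem.List.slice_natCast_add, PySem.List.slice_natCast_add,
    List.drop_reverse]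
  have h3 : cs.length - (cs.length - (j + 1)) = j + 1 := by omega
  rw [h3]

-- A's fold with Set.add over distinct gap indices is a plain filterMap.
theorem foldl_add_eq (cs : List Char) (r : List Int) (acc : List (Int × Int))
    (hr : r.Nodup)
    (hinv : ∀ p ∈ acc, ∀ i ∈ r, p.1 ≠ i + 1) :
    r.foldl (fun pts i => if pvMirrored cs i (i + 1) then PySem.Set.add pts (i + 1, i + 2) else pts) acc
      = acc ++ r.filterMap (fun i => if pvMirrored cs i (i + 1) then some (i + 1, i + 2) else none) := by
  induction r generalizing acc with
  | nil => simp
  | cons a r ih =>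
    simp only [List.foldl_cons, List.filterMap_cons]
    rcases List.nodup_cons.mp hr with ⟨ha, hr'⟩
    by_cases hc : pvMirrored cs a (a + 1) = true
    · rw [if_pos hc, if_pos hc]
      have hadd : PySem.Set.add acc (a + 1, a + 2) = acc ++ [(a + 1, a + 2)] := by
        have hmem : (a + 1, a + 2) ∉ acc := fun hm =>
          hinv _ hm a (List.mem_cons_self) rfl
        simp [PySem.Set.add, hmem]
      rw [hadd, ih (acc ++ [(a + 1, a + 2)]) hr' (by
        intro p hp i hi
        rcases List.mem_append.mp hp with hp | hp
        · exact hinv p hp i (List.mem_cons_of_mem _ hi)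
        · have hpe : p = (a + 1, a + 2) := List.mem_singleton.mp hp
          subst hpe
          intro hcontra
          simp only [] at hcontra
          have h5 : a = i := by omega
          exact ha (h5 ▸ hi))]
      rw [List.append_assoc]; rfl
    · rw [if_neg hc, if_neg hc]
      exact ih acc hr' (fun p hp i hi => hinv p hp i (List.mem_cons_of_mem _ hi))

-- ===== VERDICT (by name: the statement is the Claim_ definition above) =====
theorem reflection_points_spec : Claim_equal_reflection_points := by
  intro line _
  unfold Spec_reflection_points reflection_points reflection_points_alt
  set cs := line.toList with hcs
  set r := PySem.List.pyRange 0 ((cs.length : Int) - 1) 1 with hrdef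
  have hmemr : ∀ i ∈ r, 0 ≤ i ∧ i < (cs.length : Int) - 1 := by
    intro i hi; exact PySem.List.mem_pyRange_one.mp hi
  have hr : r.Nodup := by
    by_cases h0 : cs.length = 0
    · have hnil : r = [] := List.eq_nil_iff_forall_not_mem.mpr (by
        intro x hx; have := hmemr x hx; omega)
      rw [hnil]; exact List.nodup_nil
    · have hcast : (cs.length : Int) - 1 = ((cs.length - 1 : Nat) : Int) := by omega
      rw [hrdef, hcast, PySem.List.pyRange_zero_natCast]
      exact (List.nodup_range).map (fun a b => by omega)
  have hA := foldl_add_eq cs r PySem.Set.empty hr (by intro p hp; simp [PySem.Set.empty] at hp)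
  simp only [PySem.Set.empty, List.nil_append] at hA
  simp only [PySem.Set.empty]
  rw [hA]
  have hcongr : r.filterMap (fun i => if pvMirrored cs i (i + 1) then some (i + 1, i + 2) else none)
      = r.filterMap (fun i =>
          if PySem.List.slice cs (some (i + 1)) (some (i + 1 + min (i + 1) ((cs.length : Int) - 1 - i)))
              = PySem.List.slice cs.reverse (some ((cs.length : Int) - 1 - i))
                (some ((cs.length : Int) - 1 - i + min (i + 1) ((cs.length : Int) - 1 - i)))
          then some (i + 1, i + 2) else none) := by
    apply List.filterMap_congr
    intro i hi
    obtain ⟨hi0, hi1⟩ := hmemr i hi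
    obtain ⟨j, rfl⟩ : ∃ j : Nat, i = (j : Int) := ⟨i.toNat, by omega⟩
    have hj : j + 1 < cs.length := by omega
    have hc1 : (j : Int) + 1 = ((j + 1 : Nat) : Int) := by push_cast; ring
    have hiff : (pvMirrored cs (j : Int) ((j : Int) + 1) = true)
        ↔ (PySem.List.slice cs (some ((j : Int) + 1)) (some ((j : Int) + 1 + min ((j : Int) + 1) ((cs.length : Int) - 1 - j)))
            = PySem.List.slice cs.reverse (some ((cs.length : Int) - 1 - j))
              (some ((cs.length : Int) - 1 - j + min ((j : Int) + 1) ((cs.length : Int) - 1 - j)))) := by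
      have hpv : pvMirrored cs ((j:Int)) ((j:Int) + 1) = pvMirrored cs (j:Int) (((j+1:Nat)):Int) := by
        rw [hc1]
      rw [hpv, pvMirrored_iff cs j (j + 1) (by omega)]
      exact (slice_cond_eq cs j hj).symm
    exact if_congr hiff rfl rfl
  rw [hcongr]
  have hnodup : (r.filterMap (fun i =>
      if PySem.List.slice cs (some (i + 1)) (some (i + 1 + min (i + 1) ((cs.length : Int) - 1 - i)))
          = PySem.List.slice cs.reverse (some ((cs.length : Int) - 1 - i))
            (some ((cs.length : Int) - 1 - i + min (i + 1) ((cs.length : Int) - 1 - i)))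
      then some (i + 1, i + 2) else none)).Nodup := by
    apply List.Nodup.filterMap _ hr
    intro a a' b hb hb'
    simp only [Option.mem_def] at hb hb'
    split at hb
    · split at hb'
      · injection hb with hb
        injection hb' with hb'
        rw [← hb] at hb'
        have h6 : a + 1 = a' + 1 := congrArg Prod.fst hb'.symm
        omega
      · cases hb'
    · cases hb
  rw [PySem.Set.ofList_eq_self_of_nodup _ hnodup]
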